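-- pv_equiv track=rewrite | github.com/UndiFineD/DebVisor | scripts/fix_markdown_lint_comprehensive.py | fix_trailing_spaces
-- ===== SOURCE A (Python) =====
-- def fix_trailing_spaces(content: str) -> str:
--     """Remove trailing spaces (MD009)."""
--     lines = content.split('\n')
--     result = []
--     for line in lines:
--         if line.endswith('  ') and not line.endswith('   '):
--             result.append(line)
--         else:
--             result.append(line.rstrip())
--     return '\n'.join(result)
-- ===== SOURCE B (Python) =====
-- def fix_trailing_spaces(content: str) -> str:
--     """Remove trailing spaces (MD009): single character-level pass.
--
--     Buffers each run of non-newline whitespace; at a line boundary the run is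
--     kept only when the line ends with exactly two spaces, otherwise dropped.
--     """
--     out = []
--     run = []
--     def keep(run):
--         # line ends with exactly two spaces: run ends '  ' but not '   '
--         # (a char before the run is non-whitespace, hence not a space)
--         return (len(run) >= 2 and run[-1] == ' ' and run[-2] == ' '
--                 and not (len(run) >= 3 and run[-3] == ' '))
--     for ch in content:
--         if ch == '\n':
--             if keep(run):
--                 out.extend(run)
--             run = []
--             out.append('\n')
--         elif ch.isspace():
--             run.append(ch)
--         else:
--             out.extend(run)
--             run = []
--             out.append(ch)
--     if keep(run):
--         out.extend(run)
--     return ''.join(out)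
-- ===== Notes on version B (the rewrite author's own statement) =====
-- stated objective: alternative
-- what changed: Replaces A's split-on-newline / per-line endswith-or-rstrip loop / join with a single character-level pass that buffers each run of non-newline whitespace and, at each line boundary, keeps the run only when the line ends with exactly two spaces and drops it otherwise.
import Mathlib
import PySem

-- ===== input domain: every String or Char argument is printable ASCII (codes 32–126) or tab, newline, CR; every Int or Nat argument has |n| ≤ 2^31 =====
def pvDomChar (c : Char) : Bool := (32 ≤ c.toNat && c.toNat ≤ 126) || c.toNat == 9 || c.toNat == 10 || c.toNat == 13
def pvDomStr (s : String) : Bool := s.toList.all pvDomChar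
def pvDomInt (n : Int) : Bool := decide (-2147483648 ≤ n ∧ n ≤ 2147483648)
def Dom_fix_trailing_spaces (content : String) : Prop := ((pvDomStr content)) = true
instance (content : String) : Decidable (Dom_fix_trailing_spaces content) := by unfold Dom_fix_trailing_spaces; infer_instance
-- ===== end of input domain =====

-- B replaces A's split('\n')/per-line loop/join with a single character-level pass
-- that buffers each run of non-newline whitespace and decides at the line boundary
-- whether to keep it (line ends with exactly two spaces) or drop it; same return value.

-- ===== PORT A =====
-- the body of A's loop: keep the line if it ends with exactly two spaces, else rstrip it
def fts_rule (line : List Char) : List Char :=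
  if PySem.Chars.endswith line [' ', ' '] && !PySem.Chars.endswith line [' ', ' ', ' '] then line
  else PySem.Chars.rstrip line

def fix_trailing_spaces (content : String) : String :=
  String.ofList (PySem.Chars.join ['\n']
    ((PySem.Chars.splitOn content.toList ['\n']).foldl
      (fun result line => result ++ [fts_rule line]) []))

-- ===== PORT B =====
-- Source B's keep(run): run[-1]/run[-2]/run[-3] are Python negative indexing -> PySem.List.pyGet?
def fts_keep (run : List Char) : Bool :=
  decide (2 ≤ run.length) && (PySem.List.pyGet? run (-1) == some ' ')
    && (PySem.List.pyGet? run (-2) == some ' ')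
    && !(decide (3 ≤ run.length) && (PySem.List.pyGet? run (-3) == some ' '))

-- Source B's loop body over state (out, run)
def fts_step (s : List Char × List Char) (ch : Char) : List Char × List Char :=
  if ch == '\n' then ((if fts_keep s.2 then s.1 ++ s.2 else s.1) ++ ['\n'], [])
  else if PySem.Chars.isspace ch then (s.1, s.2 ++ [ch])
  else (s.1 ++ s.2 ++ [ch], [])

def fix_trailing_spaces_alt (content : String) : String :=
  let s := content.toList.foldl fts_step ([], [])
  String.ofList (if fts_keep s.2 then s.1 ++ s.2 else s.1)

-- ===== PRECONDITION & SPEC =====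
def Spec_fix_trailing_spaces (content : String) (out : String) : Prop := out = fix_trailing_spaces_alt content
instance (content : String) (out : String) : Decidable (Spec_fix_trailing_spaces content out) := by unfold Spec_fix_trailing_spaces; infer_instance

-- ===== CLAIM (what is proved, stated in full; the proofs are below) =====
def Claim_equal_fix_trailing_spaces : Prop := ∀ (content : String), Dom_fix_trailing_spaces content → Spec_fix_trailing_spaces content (fix_trailing_spaces content)


-- ===== LEMMAS AND PROOFS =====

-- proof-side structural characterisation of content.split('\n')
def pvParts : List Char → List (List Char)
  | [] => [[]]
  | c :: rest => if c = '\n' then [] :: pvParts rest else (pvParts rest).modifyHead (c :: ·)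

theorem pvParts_ne_nil (cs : List Char) : pvParts cs ≠ [] := by
  induction cs with
  | nil => simp [pvParts]
  | cons c rest ih =>
    simp only [pvParts]
    split
    · simp
    · obtain ⟨p, ps, hp⟩ := List.exists_cons_of_ne_nil ih
      simp [hp]

theorem splitOn_go_spec (l : List Char) : ∀ (fuel : Nat) (cur : List Char) (acc : List (List Char)),
    l.length < fuel →
    PySem.Chars.splitOn.go ['\n'] fuel l cur acc
      = acc.reverse ++ (pvParts l).modifyHead (cur.reverse ++ ·) := by
  induction l with
  | nil =>
    intro fuel cur acc hf
    cases fuel with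
    | zero => omega
    | succ f => rw [PySem.Chars.splitOn.go.eq_def]; simp [pvParts]
  | cons c rest ih =>
    intro fuel cur acc hf
    cases fuel with
    | zero => simp at hf
    | succ f =>
      rw [PySem.Chars.splitOn.go.eq_def]
      simp only []
      by_cases hc : c = '\n'
      · subst hc
        have hpre : List.isPrefixOf ['\n'] ('\n' :: rest) = true := by simp [List.isPrefixOf]
        rw [if_pos hpre]
        have hdrop : List.drop (['\n'].length) ('\n' :: rest) = rest := by simp
        rw [hdrop]
        simp only [List.length_cons] at hf
        rw [ih f [] ((cur.reverse :: acc)) (by omega)]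
        obtain ⟨p, ps, hp⟩ := List.exists_cons_of_ne_nil (pvParts_ne_nil rest)
        simp [pvParts, hp]
      · have hpre : List.isPrefixOf ['\n'] (c :: rest) = false := by
          simp only [List.isPrefixOf, Bool.and_eq_false_iff]
          left
          simp only [beq_eq_false_iff_ne, ne_eq]
          exact fun h => hc h.symm
        rw [if_neg (by simp [hpre])]
        simp only [List.length_cons] at hf
        rw [ih f (c :: cur) acc (by omega)]
        obtain ⟨p, ps, hp⟩ := List.exists_cons_of_ne_nil (pvParts_ne_nil rest)
        simp [pvParts, hp, hc]

theorem splitOn_eq_pvParts (cs : List Char) :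
    PySem.Chars.splitOn cs ['\n'] = pvParts cs := by
  unfold PySem.Chars.splitOn
  rw [splitOn_go_spec cs (cs.length + 1) [] [] (by omega)]
  obtain ⟨p, ps, hp⟩ := List.exists_cons_of_ne_nil (pvParts_ne_nil cs)
  simp [hp]

-- Python negative indexing read off the reversed list
theorem pyGet_neg (run : List Char) (k : Nat) (h1 : 1 ≤ k) (h2 : k ≤ run.length) :
    PySem.List.pyGet? run (-(k : Int)) = run.reverse[k - 1]? := by
  simp only [PySem.List.pyGet?, PySem.List.pyIdx?]
  rw [if_neg (by omega), if_pos (by omega)]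
  have hk : (-(-(k:Int))).toNat = k := by omega
  rw [hk]
  simp only [Option.bind_some]
  rw [List.getElem?_reverse (by omega)]
  congr 1
  omega

theorem keep_iff (run : List Char) :
    fts_keep run
      = (PySem.Chars.endswith run [' ', ' '] && !PySem.Chars.endswith run [' ', ' ', ' ']) := by
  have hrw : ∀ (pat : List Char), PySem.Chars.endswith run pat = (pat.reverse.isPrefixOf run.reverse) := by
    intro pat
    simp only [PySem.Chars.endswith]
    rw [Bool.eq_iff_iff]
    simp [List.isSuffixOf_iff_suffix, List.isPrefixOf_iff_prefix, List.reverse_prefix]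
  rw [hrw, hrw]
  have hlen : run.length = run.reverse.length := by simp
  match hrs : run.reverse with
  | [] =>
    have : run.length = 0 := by rw [hlen, hrs]; rfl
    simp [fts_keep, this]
  | [a] =>
    have : run.length = 1 := by rw [hlen, hrs]; rfl
    simp [fts_keep, this]
  | [a, b] =>
    have h2 : run.length = 2 := by rw [hlen, hrs]; rfl
    simp only [fts_keep]
    rw [show (-1 : Int) = -((1:Nat):Int) by norm_num, show (-2 : Int) = -((2:Nat):Int) by norm_num,
        show (-3 : Int) = -((3:Nat):Int) by norm_num]
    rw [pyGet_neg run 1 (by omega) (by omega), pyGet_neg run 2 (by omega) (by omega), hrs]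
    rw [decide_eq_false (by omega : ¬ 3 ≤ run.length),
        decide_eq_true (by omega : 2 ≤ run.length)]
    simp [List.isPrefixOf, BEq.comm]
  | a :: b :: c :: t =>
    have h3 : 3 ≤ run.length := by rw [hlen, hrs]; simp
    simp only [fts_keep]
    rw [show (-1 : Int) = -((1:Nat):Int) by norm_num, show (-2 : Int) = -((2:Nat):Int) by norm_num,
        show (-3 : Int) = -((3:Nat):Int) by norm_num]
    rw [pyGet_neg run 1 (by omega) (by omega), pyGet_neg run 2 (by omega) (by omega),
        pyGet_neg run 3 (by omega) (by omega), hrs]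
    rw [decide_eq_true (by omega : 2 ≤ run.length), decide_eq_true (by omega : 3 ≤ run.length)]
    simp [List.isPrefixOf, BEq.comm]
    cases hA : (a == ' ') <;> cases hB : (b == ' ') <;> cases hC : (c == ' ') <;>
      simp_all

-- an all-space pattern is a prefix of xs ++ c :: ys (c not a space) iff it is a prefix of xs
theorem spaces_prefix_append (pat : List Char) : ∀ (xs ys : List Char) (c : Char),
    (∀ a ∈ pat, a = ' ') → c ≠ ' ' →
    (pat <+: (xs ++ c :: ys)) = (pat <+: xs) := by
  induction pat with
  | nil => intro xs ys c _ _; simp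
  | cons a pat ih =>
    intro xs ys c hpat hc
    have ha : a = ' ' := hpat a (by simp)
    cases xs with
    | nil =>
      simp only [List.nil_append]
      rw [eq_iff_iff]
      constructor
      · intro h
        rw [List.cons_prefix_cons] at h
        have hca : c = ' ' := by rw [← ha]; exact h.1.symm
        exact absurd hca hc
      · intro h
        exact absurd (List.IsPrefix.length_le h) (by simp)
    | cons x xs =>
      simp only [List.cons_append, List.cons_prefix_cons]
      rw [ih xs ys c (fun b hb => hpat b (by simp [hb])) hc]

theorem endswith_append_nonspace (pat pre p : List Char) (c : Char)
    (hpat : ∀ a ∈ pat, a = ' ') (hc : PySem.Chars.isspace c = false) :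
    PySem.Chars.endswith (pre ++ c :: p) pat = PySem.Chars.endswith p pat := by
  have hc' : c ≠ ' ' := by
    intro h; subst h; simp [PySem.Chars.isspace] at hc
  simp only [PySem.Chars.endswith]
  rw [Bool.eq_iff_iff]
  simp only [List.isSuffixOf_iff_suffix]
  rw [← List.reverse_prefix, ← List.reverse_prefix (l₁ := pat)]
  rw [show (pre ++ c :: p).reverse = p.reverse ++ c :: pre.reverse by simp]
  rw [spaces_prefix_append pat.reverse p.reverse pre.reverse c
        (fun a ha => hpat a (List.mem_reverse.mp ha)) hc']

theorem rstrip_all_space (run : List Char) (h : ∀ a ∈ run, PySem.Chars.isspace a = true) :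
    PySem.Chars.rstrip run = [] := by
  simp only [PySem.Chars.rstrip, List.reverse_eq_nil_iff]
  rw [List.dropWhile_eq_nil_iff]
  intro x hx
  exact h x (List.mem_reverse.mp hx)

theorem rstrip_append_nonspace (pre p : List Char) (c : Char)
    (hc : PySem.Chars.isspace c = false) :
    PySem.Chars.rstrip (pre ++ c :: p) = pre ++ c :: PySem.Chars.rstrip p := by
  simp only [PySem.Chars.rstrip]
  rw [show (pre ++ c :: p).reverse = p.reverse ++ c :: pre.reverse by simp]
  rw [List.dropWhile_append]
  split
  · rename_i hemp
    rw [List.isEmpty_iff] at hemp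
    rw [hemp]
    simp [hc]
  · simp

theorem rule_whitespace_run (run : List Char)
    (h : ∀ a ∈ run, PySem.Chars.isspace a = true) :
    fts_rule run = if fts_keep run then run else [] := by
  simp only [fts_rule]
  rw [← keep_iff]
  split
  · rfl
  · exact rstrip_all_space run h

theorem rule_split (run p : List Char) (c : Char)
    (hc : PySem.Chars.isspace c = false) :
    fts_rule (run ++ c :: p) = run ++ c :: fts_rule p := by
  have hp2 : ∀ a ∈ [' ', ' '], a = ' ' := by intro a ha; simp at ha; simp [ha]
  have hp3 : ∀ a ∈ [' ', ' ', ' '], a = ' ' := by intro a ha; simp at ha; simp [ha]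
  simp only [fts_rule, endswith_append_nonspace _ run p c hp2 hc,
    endswith_append_nonspace _ run p c hp3 hc,
    rstrip_append_nonspace run p c hc]
  split <;> rfl

theorem fts_step_out (o r : List Char) (ch : Char) :
    fts_step (o, r) ch = (o ++ (fts_step ([], r) ch).1, (fts_step ([], r) ch).2) := by
  simp only [fts_step]
  split_ifs <;> simp

theorem foldl_step_out (cs : List Char) : ∀ (o r : List Char),
    cs.foldl fts_step (o, r)
      = (o ++ (cs.foldl fts_step ([], r)).1, (cs.foldl fts_step ([], r)).2) := by
  induction cs with
  | nil => intro o r; simp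
  | cons ch cs ih =>
    intro o r
    simp only [List.foldl_cons]
    rw [fts_step_out o r ch, ih (o ++ (fts_step ([], r) ch).1) (fts_step ([], r) ch).2,
        ih (fts_step ([], r) ch).1 (fts_step ([], r) ch).2]
    simp [List.append_assoc]

theorem main_inv (cs : List Char) : ∀ (run : List Char),
    (∀ a ∈ run, PySem.Chars.isspace a = true ∧ a ≠ '\n') →
    (if fts_keep (cs.foldl fts_step ([], run)).2
       then (cs.foldl fts_step ([], run)).1 ++ (cs.foldl fts_step ([], run)).2
       else (cs.foldl fts_step ([], run)).1)
      = PySem.Chars.join ['\n'] (((pvParts cs).modifyHead (run ++ ·)).map fts_rule) := by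
  induction cs with
  | nil =>
    intro run h
    simp only [List.foldl_nil, pvParts, List.modifyHead, List.map, List.append_nil]
    rw [PySem.Chars.join_singleton]
    rw [rule_whitespace_run run (fun a ha => (h a ha).1)]
    split <;> simp
  | cons ch cs ih =>
    intro run h
    obtain ⟨p, ps, hp⟩ := List.exists_cons_of_ne_nil (pvParts_ne_nil cs)
    by_cases hnl : ch = '\n'
    · subst hnl
      have hstep : fts_step ([], run) '\n'
          = ((if fts_keep run then run else []) ++ ['\n'], []) := by
        simp [fts_step]
      rw [List.foldl_cons, hstep, foldl_step_out]
      have ih0 := ih [] (by simp)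
      simp only [List.modifyHead, hp, List.nil_append] at ih0
      have hpv : pvParts ('\n' :: cs) = [] :: p :: ps := by simp [pvParts, hp]
      rw [hpv]
      simp only [List.modifyHead, List.append_nil, List.map_cons]
      rw [PySem.Chars.join_cons_cons]
      rw [rule_whitespace_run run (fun a ha => (h a ha).1)]
      split at ih0 <;> rename_i hF <;> simp [hF, ih0, List.append_assoc]
    · by_cases hsp : PySem.Chars.isspace ch = true
      · have hstep : fts_step ([], run) ch = ([], run ++ [ch]) := by
          simp [fts_step, hnl, hsp]
        rw [List.foldl_cons, hstep]
        rw [ih (run ++ [ch]) (by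
          intro a ha
          rcases List.mem_append.mp ha with h1 | h1
          · exact h a h1
          · simp at h1; subst h1; exact ⟨hsp, hnl⟩)]
        have hpv : pvParts (ch :: cs) = (ch :: p) :: ps := by simp [pvParts, hnl, hp]
        rw [hpv]
        simp [List.modifyHead, hp]
      · have hsp' : PySem.Chars.isspace ch = false := by
          cases hh : PySem.Chars.isspace ch
          · rfl
          · exact absurd hh hsp
        have hstep : fts_step ([], run) ch = (run ++ [ch], []) := by
          simp [fts_step, hnl, hsp']
        rw [List.foldl_cons, hstep, foldl_step_out]
        have ih0 := ih [] (by simp)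
        simp only [List.modifyHead, hp, List.nil_append] at ih0
        have hpv : pvParts (ch :: cs) = (ch :: p) :: ps := by simp [pvParts, hnl, hp]
        rw [hpv]
        simp only [List.modifyHead, List.map_cons]
        rw [rule_split run p ch hsp']
        cases hps : ps with
        | nil =>
          simp only [hps, List.map_cons, List.map_nil] at ih0 ⊢
          rw [PySem.Chars.join_singleton] at ih0 ⊢
          split at ih0 <;> rename_i hF <;> simp [hF, ih0, List.append_assoc]
        | cons q qs =>
          simp only [hps, List.map_cons] at ih0 ⊢
          rw [PySem.Chars.join_cons_cons] at ih0 ⊢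
          split at ih0 <;> rename_i hF <;> simp [hF, ih0, List.append_assoc]


-- ===== VERDICT (by name: the statement is the Claim_ definition above) =====
theorem fix_trailing_spaces_spec : Claim_equal_fix_trailing_spaces := by
  intro content _
  unfold Spec_fix_trailing_spaces fix_trailing_spaces fix_trailing_spaces_alt
  rw [PySem.List.foldl_append_singleton_eq_map, splitOn_eq_pvParts]
  obtain ⟨p, ps, hp⟩ := List.exists_cons_of_ne_nil (pvParts_ne_nil content.toList)
  have hm := main_inv content.toList [] (by simp)
  simp only [List.modifyHead, hp, List.nil_append] at hm
  simp only [hp, List.nil_append]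
  rw [← hm]
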